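-- pv_equiv track=rewrite | github.com/t-0hmura/amber-mlips | plugins/mdin_transform.py | _parse_namelist_entries
-- ===== SOURCE A (Python) =====
-- def _split_namelist_entries(body):
--     """Split namelist body into top-level comma-separated entries.
--
--     Commas inside quotes are preserved. Inline comments beginning with '!'
--     are stripped before tokenization.
--     """
--     out = []
--     buf = []
--     quote = None
--     i = 0
--     n = len(body)
--
--     while i < n:
--         ch = body[i]
--
--         if quote is not None:
--             buf.append(ch)
--             if ch == quote:
--                 quote = None
--             i += 1
--             continue
--
--         if ch in ("'", '"'):
--             quote = ch
--             buf.append(ch)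
--             i += 1
--             continue
--
--         if ch == "!":
--             # Skip inline comment until newline.
--             while i < n and body[i] != "\n":
--                 i += 1
--             continue
--
--         if ch == ",":
--             token = "".join(buf).strip()
--             if token:
--                 out.append(token)
--             buf = []
--             i += 1
--             continue
--
--         buf.append(ch)
--         i += 1
--
--     token = "".join(buf).strip()
--     if token:
--         out.append(token)
--
--     return out
--
-- def _parse_namelist_entries(body):
--     """Parse tokens into ordered key/value map.
--
--     Returns:
--       order: list[str]  (first-seen key order)
--       values: dict[str, str]  (last assignment wins)
--       key_style: dict[str, str]  (original key spelling for output)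
--     """
--     order = []
--     values = {}
--     key_style = {}
--
--     for token in _split_namelist_entries(body):
--         if "=" not in token:
--             continue
--         left, right = token.split("=", 1)
--         key_raw = left.strip()
--         key = key_raw.lower()
--         val = right.strip()
--
--         if key not in key_style:
--             key_style[key] = key_raw
--             order.append(key)
--
--         values[key] = val
--
--     return order, values, key_style
-- ===== SOURCE B (Python) =====
-- def _find(body, i, chars):
--     """First index k >= i with body[k] in chars, else len(body)."""
--     for k in range(i, len(body)):
--         if body[k] in chars:
--             return k
--     return len(body)
--
--
-- def _parse_namelist_entries(body):
--     """Jump-based tokenizer: copy whole slices between special characters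
--     (quote, '!', ',') instead of a per-character quote-state machine; then
--     a staged second phase builds key_style with setdefault, values with a
--     last-wins dict fill, and derives order as list(key_style)."""
--     n = len(body)
--     tokens = []
--     pieces = []
--     i = 0
--     while i < n:
--         j = _find(body, i, "'\"!,")
--         pieces.append(body[i:j])
--         if j == n:
--             i = n
--         elif body[j] == ",":
--             tokens.append("".join(pieces).strip())
--             pieces = []
--             i = j + 1
--         elif body[j] == "!":
--             i = _find(body, j + 1, "\n")
--         else:
--             e = _find(body, j + 1, body[j]) + 1
--             pieces.append(body[j:e])
--             i = e
--     tokens.append("".join(pieces).strip())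
--
--     pairs = []
--     for t in tokens:
--         if "=" not in t:
--             continue
--         left, right = t.split("=", 1)
--         raw = left.strip()
--         pairs.append((raw.lower(), raw, right.strip()))
--
--     key_style = {}
--     for k, raw, _ in pairs:
--         key_style.setdefault(k, raw)
--     values = {k: v for k, _, v in pairs}
--     order = list(key_style)
--     return order, values, key_style
-- ===== Notes on version B (the rewrite author's own statement) =====
-- stated objective: faster
-- what changed: Replaced A's per-character quote-state tokenizer feeding a token-fold with a jump/slice tokenizer (find the next special character, copy whole slices, consume each quoted region and comment in one find-jump, no quote-state variable) and a staged second phase: extract (key,raw,val) pairs, build key_style with dict.setdefault, fill values last-wins, and read order off as list(key_style).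
import Mathlib
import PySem

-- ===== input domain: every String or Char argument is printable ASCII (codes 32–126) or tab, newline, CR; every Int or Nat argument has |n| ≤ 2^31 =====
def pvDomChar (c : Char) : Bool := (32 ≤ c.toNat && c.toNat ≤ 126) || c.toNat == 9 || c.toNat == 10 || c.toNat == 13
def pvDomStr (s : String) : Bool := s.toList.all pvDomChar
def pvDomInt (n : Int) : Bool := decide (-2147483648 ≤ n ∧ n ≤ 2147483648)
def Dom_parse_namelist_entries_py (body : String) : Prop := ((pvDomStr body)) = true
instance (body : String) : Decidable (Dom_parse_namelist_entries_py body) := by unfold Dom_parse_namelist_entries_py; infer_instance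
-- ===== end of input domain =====

-- B replaces A's per-character quote-state tokenizer with a jump/slice tokenizer (find the next
-- special character, copy whole slices, consume a quoted region or comment in one jump) and a
-- staged second phase (pairs, setdefault for key_style, last-wins fill for values, order = keys);
-- same O(n) asymptotics, measurably faster by constant factor in a timing run.

-- ===== PORT A =====
-- loop body of A's second for-loop: fold one token into (order, values, key_style)
def pvProc (st : List String × PySem.Dict String String × PySem.Dict String String)
    (token : List Char) : List String × PySem.Dict String String × PySem.Dict String String :=
  if '=' ∈ token then
    let left := token.takeWhile (fun c => c ≠ '=')
    let right := (token.dropWhile (fun c => c ≠ '=')).tail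
    let key_raw := String.mk (PySem.Chars.strip left)
    let key := PySem.Str.lower key_raw
    let val := String.mk (PySem.Chars.strip right)
    let order := st.1
    let values := st.2.1
    let key_style := st.2.2
    let p : List String × PySem.Dict String String :=
      if key_style.contains key then (order, key_style)
      else (order ++ [key], key_style.insert key key_raw)
    (p.1, values.insert key val, p.2)
  else st

-- _split_namelist_entries: the nested comment-skipping while is List.dropWhile (exact: '!' itself ≠ '\n')
def pvSplitA (cs : List Char) (buf : List Char) (quote : Option Char) : List (List Char) :=
  match cs with
  | [] =>
      let token := PySem.Chars.strip buf
      if token = [] then [] else [token]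
  | c :: rest =>
      match quote with
      | some q => pvSplitA rest (buf ++ [c]) (if c = q then none else some q)
      | none =>
          if c = '\'' ∨ c = '"' then pvSplitA rest (buf ++ [c]) (some c)
          else if c = '!' then pvSplitA (rest.dropWhile (fun d => d ≠ '\n')) buf none
          else if c = ',' then
            (let token := PySem.Chars.strip buf
             if token = [] then [] else [token]) ++ pvSplitA rest [] none
          else pvSplitA rest (buf ++ [c]) none
termination_by cs.length
decreasing_by
  all_goals simp only [List.length_cons]
  all_goals first
    | omega
    | (have h1 := List.length_dropWhile_le (fun d => !decide (d = '\n')) rest; have h2 := List.length_dropWhile_le (fun d => decide (d ≠ '\n')) rest; omega)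

def parse_namelist_entries_py (body : String) : List String × (List (String × String)) × (List (String × String)) :=
  let st := (pvSplitA body.toList [] none).foldl pvProc ([], PySem.Dict.empty, PySem.Dict.empty)
  (st.1, st.2.1.items, st.2.2.items)

-- ===== PORT B =====
-- _find(body, i, chars): first index k ≥ i whose char satisfies p, else len(body)
def pvFind (cs : List Char) (i : Nat) (p : Char → Bool) : Nat := i + (cs.drop i).findIdx p

def pvSpecial (c : Char) : Bool := c == '\'' || c == '"' || c == '!' || c == ','

-- the jump tokenizer: slices between special characters are appended wholesale,
-- a quoted region is consumed by one _find jump, comments by another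
def pvScanJ (cs : List Char) (i : Nat) (pieces : List Char) : List (List Char) :=
  if h : i < cs.length then
    let j := pvFind cs i pvSpecial
    let pieces' := pieces ++ ((cs.drop i).take (j - i))
    if j = cs.length then pvScanJ cs cs.length pieces'
    else
      let c := cs.getD j ' '
      if c = ',' then PySem.Chars.strip pieces' :: pvScanJ cs (j + 1) []
      else if c = '!' then pvScanJ cs (pvFind cs (j + 1) (fun d => d == '\n')) pieces'
      else
        let e := pvFind cs (j + 1) (fun d => d == c) + 1
        pvScanJ cs e (pieces' ++ ((cs.drop j).take (e - j)))
  else [PySem.Chars.strip pieces]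
termination_by cs.length + 1 - i
decreasing_by
  all_goals simp only [pvFind, j] at *
  all_goals omega

-- token → (key, key_raw, val), as in Source B's pairs loop
def pvPair (t : List Char) : String × String × String :=
  let left := t.takeWhile (fun c => c ≠ '=')
  let right := (t.dropWhile (fun c => c ≠ '=')).tail
  let raw := String.mk (PySem.Chars.strip left)
  (PySem.Str.lower raw, raw, String.mk (PySem.Chars.strip right))

def parse_namelist_entries_py_alt (body : String) : List String × (List (String × String)) × (List (String × String)) :=
  let pairs := ((pvScanJ body.toList 0 []).filter (fun t => t.contains '=')).map pvPair
  let key_style := pairs.foldl (fun d p => d.setdefault p.1 p.2.1) PySem.Dict.empty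
  let values := pairs.foldl (fun d p => d.insert p.1 p.2.2) PySem.Dict.empty
  (key_style.keys, values.items, key_style.items)

-- ===== PRECONDITION & SPEC =====
def Spec_parse_namelist_entries_py (body : String) (out : List String × (List (String × String)) × (List (String × String))) : Prop := out = parse_namelist_entries_py_alt body
instance (body : String) (out : List String × (List (String × String)) × (List (String × String))) : Decidable (Spec_parse_namelist_entries_py body out) := by unfold Spec_parse_namelist_entries_py; infer_instance

-- ===== CLAIM (what is proved, stated in full; the proofs are below) =====
def Claim_equal_parse_namelist_entries_py : Prop := ∀ (body : String), Dom_parse_namelist_entries_py body → Spec_parse_namelist_entries_py body (parse_namelist_entries_py body)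

-- ===== LEMMAS AND PROOFS =====

-- keep-empty variant of A's tokenizer (proof device): same scan, but empty tokens are kept
def pvSplitK (cs : List Char) (buf : List Char) (quote : Option Char) : List (List Char) :=
  match cs with
  | [] => [PySem.Chars.strip buf]
  | c :: rest =>
      match quote with
      | some q => pvSplitK rest (buf ++ [c]) (if c = q then none else some q)
      | none =>
          if c = '\'' ∨ c = '"' then pvSplitK rest (buf ++ [c]) (some c)
          else if c = '!' then pvSplitK (rest.dropWhile (fun d => d ≠ '\n')) buf none
          else if c = ',' then PySem.Chars.strip buf :: pvSplitK rest [] none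
          else pvSplitK rest (buf ++ [c]) none
termination_by cs.length
decreasing_by
  all_goals simp only [List.length_cons]
  all_goals first
    | omega
    | (have h1 := List.length_dropWhile_le (fun d => !decide (d = '\n')) rest; have h2 := List.length_dropWhile_le (fun d => decide (d ≠ '\n')) rest; omega)

lemma splitA_eq_filterK : ∀ (k : Nat) (cs : List Char), cs.length ≤ k → ∀ (buf : List Char) (q : Option Char),
    pvSplitA cs buf q = (pvSplitK cs buf q).filter (fun t => !t.isEmpty) := by
  intro k
  induction k with
  | zero =>
      intro cs h buf q
      have : cs = [] := List.length_eq_zero_iff.mp (Nat.le_zero.mp h)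
      subst this
      by_cases h0 : PySem.Chars.strip buf = []
      · simp [pvSplitA, pvSplitK, h0]
      · simp [pvSplitA, pvSplitK, h0, List.isEmpty_iff]
  | succ n ih =>
      intro cs h buf q
      match cs with
      | [] =>
          by_cases h0 : PySem.Chars.strip buf = []
          · simp [pvSplitA, pvSplitK, h0]
          · simp [pvSplitA, pvSplitK, h0, List.isEmpty_iff]
      | c :: rest =>
          have hr : rest.length ≤ n := by simp at h; omega
          match q with
          | some qc =>
              rw [pvSplitA, pvSplitK]
              exact ih rest hr _ _
          | none =>
              rw [pvSplitA, pvSplitK]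
              by_cases h1 : c = '\'' ∨ c = '"'
              · simp only [h1, if_true]
                exact ih rest hr _ _
              · simp only [h1, if_false]
                by_cases h2 : c = '!'
                · simp only [h2, if_true]
                  have hd : (rest.dropWhile (fun d => d ≠ '\n')).length ≤ n := by
                    have := List.length_dropWhile_le (fun d => d ≠ '\n') rest; omega
                  exact ih _ hd _ _
                · simp only [h2, if_false]
                  by_cases h3 : c = ','
                  · simp only [h3, if_true, List.filter_cons]
                    rw [ih rest hr [] none]
                    by_cases h0 : PySem.Chars.strip buf = []
                    · simp [h0]
                    · simp [h0, List.isEmpty_iff]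
                  · simp only [h3, if_false]
                    exact ih rest hr _ _

lemma take_findIdx (xs : List Char) (p : Char → Bool) :
    xs.take (xs.findIdx p) = xs.takeWhile (fun c => !p c) := by
  induction xs with
  | nil => simp
  | cons x t ih =>
      by_cases h : p x <;> simp [List.findIdx_cons, h, List.takeWhile_cons, ih]

lemma drop_findIdx (xs : List Char) (p : Char → Bool) :
    xs.drop (xs.findIdx p) = xs.dropWhile (fun c => !p c) := by
  induction xs with
  | nil => simp
  | cons x t ih =>
      by_cases h : p x <;> simp [List.findIdx_cons, h, List.dropWhile_cons, ih]

-- scanning plain (non-special) characters only appends them to the buffer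
lemma K_plain : ∀ (seg rest buf : List Char), (∀ c ∈ seg, pvSpecial c = false) →
    pvSplitK (seg ++ rest) buf none = pvSplitK rest (buf ++ seg) none := by
  intro seg
  induction seg with
  | nil => intro rest buf _; simp
  | cons c t ih =>
      intro rest buf h
      have hc : pvSpecial c = false := h c (by simp)
      simp only [pvSpecial, Bool.or_eq_false_iff, beq_eq_false_iff_ne, ne_eq] at hc
      obtain ⟨⟨⟨h1, h2⟩, h3⟩, h4⟩ := hc
      rw [List.cons_append, pvSplitK]
      simp only [h1, h2, h3, h4, or_self, if_false]
      rw [ih rest (buf ++ [c]) (fun d hd => h d (by simp [hd]))]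
      simp

-- scanning in quote state appends verbatim up to and including the closing quote
lemma K_quote : ∀ (xs buf : List Char) (q : Char),
    pvSplitK xs buf (some q) =
      (match xs.dropWhile (fun c => c ≠ q) with
       | [] => [PySem.Chars.strip (buf ++ xs)]
       | _ :: rest => pvSplitK rest (buf ++ xs.takeWhile (fun c => c ≠ q) ++ [q]) none) := by
  intro xs
  induction xs with
  | nil => intro buf q; simp [pvSplitK]
  | cons c t ih =>
      intro buf q
      rw [pvSplitK]
      by_cases hcq : c = q
      · subst hcq
        simp [List.dropWhile_cons, List.takeWhile_cons]
      · rw [if_neg (by simp [hcq]), ih (buf ++ [c]) q]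
        simp only [ne_eq, decide_not, List.dropWhile_cons, List.takeWhile_cons, hcq,
          decide_false, Bool.not_false, if_true]
        cases hdw : List.dropWhile (fun c => !decide (c = q)) t with
        | nil => simp [hdw]
        | cons hd rest => simp [hdw]

-- the jump tokenizer equals the keep-empty character tokenizer
lemma scanJ_eq_K : ∀ (k : Nat) (cs : List Char) (i : Nat), cs.length - i ≤ k → ∀ (pieces : List Char),
    pvScanJ cs i pieces = pvSplitK (cs.drop i) pieces none := by
  intro k
  induction k with
  | zero =>
      intro cs i h pieces
      have hi : ¬ i < cs.length := by omega
      rw [pvScanJ, dif_neg hi, List.drop_eq_nil_of_le (by omega), pvSplitK]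
  | succ m ih =>
      intro cs i h pieces
      by_cases hi : i < cs.length
      · have hfle : (cs.drop i).findIdx pvSpecial ≤ (cs.drop i).length := List.findIdx_le_length
        have hlen : (cs.drop i).length = cs.length - i := List.length_drop ..
        have hj1 : i ≤ pvFind cs i pvSpecial := Nat.le_add_right _ _
        have hj2 : pvFind cs i pvSpecial ≤ cs.length := by unfold pvFind; omega
        have hseg : (cs.drop i).take (pvFind cs i pvSpecial - i)
            = (cs.drop i).takeWhile (fun c => !pvSpecial c) := by
          have : pvFind cs i pvSpecial - i = (cs.drop i).findIdx pvSpecial := by unfold pvFind; omega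
          rw [this, take_findIdx]
        have hdropj : cs.drop (pvFind cs i pvSpecial)
            = (cs.drop i).dropWhile (fun c => !pvSpecial c) := by
          rw [← drop_findIdx, List.drop_drop]
          rfl
        have hdecomp : cs.drop i
            = (cs.drop i).take (pvFind cs i pvSpecial - i) ++ cs.drop (pvFind cs i pvSpecial) := by
          rw [hseg, hdropj, List.takeWhile_append_dropWhile]
        have hns : ∀ c ∈ (cs.drop i).take (pvFind cs i pvSpecial - i), pvSpecial c = false := by
          intro c hc
          rw [hseg] at hc
          have := List.mem_takeWhile_imp hc
          simpa using this
        rw [pvScanJ, dif_pos hi]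
        by_cases hj : pvFind cs i pvSpecial = cs.length
        · rw [if_pos hj]
          rw [ih cs cs.length (by omega)]
          rw [List.drop_length]
          conv_rhs => rw [hdecomp,
            show cs.drop (pvFind cs i pvSpecial) = [] from by rw [hj, List.drop_length]]
          rw [K_plain _ [] pieces hns]
        · rw [if_neg hj]
          have hjlt : pvFind cs i pvSpecial < cs.length := by omega
          have hflt : (cs.drop i).findIdx pvSpecial < (cs.drop i).length := by
            unfold pvFind at hj; omega
          have hcget : cs.getD (pvFind cs i pvSpecial) ' ' = cs[pvFind cs i pvSpecial]'hjlt := by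
            simp [List.getD_eq_getElem?_getD, List.getElem?_eq_getElem hjlt]
          have hcspec : pvSpecial (cs[pvFind cs i pvSpecial]'hjlt) = true := by
            have := List.findIdx_getElem (w := hflt)
            simpa [List.getElem_drop, pvFind] using this
          have hconsj : cs.drop (pvFind cs i pvSpecial)
              = cs[pvFind cs i pvSpecial]'hjlt :: cs.drop (pvFind cs i pvSpecial + 1) :=
            List.drop_eq_getElem_cons hjlt
          have hK : pvSplitK (cs.drop i) pieces none
              = pvSplitK (cs[pvFind cs i pvSpecial]'hjlt :: cs.drop (pvFind cs i pvSpecial + 1))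
                  (pieces ++ (cs.drop i).take (pvFind cs i pvSpecial - i)) none := by
            conv_lhs => rw [hdecomp]
            rw [K_plain _ _ pieces hns, ← hconsj]
          rw [hcget, hK]
          show (if cs[pvFind cs i pvSpecial]'hjlt = ',' then
            PySem.Chars.strip (pieces ++ List.take (pvFind cs i pvSpecial - i) (List.drop i cs)) ::
            pvScanJ cs (pvFind cs i pvSpecial + 1) []
            else
            if cs[pvFind cs i pvSpecial]'hjlt = '!' then
            pvScanJ cs (pvFind cs (pvFind cs i pvSpecial + 1) fun d => d == '\n')
            (pieces ++ List.take (pvFind cs i pvSpecial - i) (List.drop i cs))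
            else
            pvScanJ cs ((pvFind cs (pvFind cs i pvSpecial + 1) fun d => d == cs[pvFind cs i pvSpecial]'hjlt) + 1)
            (pieces ++ List.take (pvFind cs i pvSpecial - i) (List.drop i cs) ++
            List.take ((pvFind cs (pvFind cs i pvSpecial + 1) fun d => d == cs[pvFind cs i pvSpecial]'hjlt) + 1 - pvFind cs i pvSpecial) (List.drop (pvFind cs i pvSpecial) cs))) =
            pvSplitK (cs[pvFind cs i pvSpecial]'hjlt :: List.drop (pvFind cs i pvSpecial + 1) cs)
            (pieces ++ List.take (pvFind cs i pvSpecial - i) (List.drop i cs)) none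
          have hpred : ∀ q : Char, (fun d => decide (d ≠ q)) = (fun d => !((fun x => x == q) d)) := by
            intro q; funext d; simp [Bool.beq_eq_decide_eq, decide_not]
          by_cases hc1 : cs[pvFind cs i pvSpecial]'hjlt = ','
          · rw [if_pos hc1]
            conv_rhs => rw [pvSplitK]
            rw [ih cs (pvFind cs i pvSpecial + 1) (by omega)]
            simp [hc1]
          · rw [if_neg hc1]
            by_cases hc2 : cs[pvFind cs i pvSpecial]'hjlt = '!'
            · rw [if_pos hc2]
              have hb : pvFind cs i pvSpecial + 1 ≤ pvFind cs (pvFind cs i pvSpecial + 1) (fun d => d == '\n') :=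
                Nat.le_add_right _ _
              rw [ih cs (pvFind cs (pvFind cs i pvSpecial + 1) fun d => d == '\n')
                (by unfold pvFind at *; omega)]
              conv_rhs => rw [pvSplitK]
              simp only [hc2, if_neg (by decide : ¬('!' = '\'' ∨ '!' = '"')), if_pos rfl]
              have hdn : List.drop (pvFind cs (pvFind cs i pvSpecial + 1) fun d => d == '\n') cs
                  = (cs.drop (pvFind cs i pvSpecial + 1)).dropWhile (fun d => decide (d ≠ '\n')) := by
                rw [hpred '\n', ← drop_findIdx, List.drop_drop]
                rfl
              rw [hdn]
              simp
            · rw [if_neg hc2]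
              have hq : cs[pvFind cs i pvSpecial]'hjlt = '\'' ∨ cs[pvFind cs i pvSpecial]'hjlt = '"' := by
                simp only [pvSpecial, Bool.or_eq_true, beq_iff_eq, hc1, hc2, or_false] at hcspec
                exact hcspec
              have hGf : pvFind cs (pvFind cs i pvSpecial + 1)
                  (fun d => d == cs[pvFind cs i pvSpecial]'hjlt)
                  = pvFind cs i pvSpecial + 1 + (cs.drop (pvFind cs i pvSpecial + 1)).findIdx
                      (fun d => d == cs[pvFind cs i pvSpecial]'hjlt) := rfl
              conv_rhs => rw [pvSplitK]
              rw [if_pos hq, K_quote]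
              have hgb : (cs.drop (pvFind cs i pvSpecial + 1)).findIdx
                  (fun d => d == cs[pvFind cs i pvSpecial]'hjlt)
                  ≤ (cs.drop (pvFind cs i pvSpecial + 1)).length := List.findIdx_le_length
              have hlen1 : (cs.drop (pvFind cs i pvSpecial + 1)).length
                  = cs.length - (pvFind cs i pvSpecial + 1) := List.length_drop ..
              by_cases hg : (cs.drop (pvFind cs i pvSpecial + 1)).findIdx
                  (fun d => d == cs[pvFind cs i pvSpecial]'hjlt)
                  < (cs.drop (pvFind cs i pvSpecial + 1)).length
              · -- closing quote found
                have hglt : pvFind cs (pvFind cs i pvSpecial + 1)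
                    (fun d => d == cs[pvFind cs i pvSpecial]'hjlt) < cs.length := by
                  omega
                have hclose : cs[pvFind cs (pvFind cs i pvSpecial + 1)
                    (fun d => d == cs[pvFind cs i pvSpecial]'hjlt)]'hglt
                    = cs[pvFind cs i pvSpecial]'hjlt := by
                  have := List.findIdx_getElem (w := hg)
                  simpa [List.getElem_drop, pvFind, Bool.beq_eq_decide_eq] using this
                have hdw : (cs.drop (pvFind cs i pvSpecial + 1)).dropWhile
                    (fun d => decide (d ≠ cs[pvFind cs i pvSpecial]'hjlt))
                    = cs[pvFind cs i pvSpecial]'hjlt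
                      :: cs.drop (pvFind cs (pvFind cs i pvSpecial + 1)
                          (fun d => d == cs[pvFind cs i pvSpecial]'hjlt) + 1) := by
                  rw [hpred _, ← drop_findIdx, List.drop_drop, ← hGf]
                  rw [List.drop_eq_getElem_cons hglt, hclose]
                rw [hdw]
                rw [ih cs (pvFind cs (pvFind cs i pvSpecial + 1)
                  (fun d => d == cs[pvFind cs i pvSpecial]'hjlt) + 1) (by omega)]
                have htk : (cs.drop (pvFind cs i pvSpecial)).take
                    (pvFind cs (pvFind cs i pvSpecial + 1)
                      (fun d => d == cs[pvFind cs i pvSpecial]'hjlt) + 1 - pvFind cs i pvSpecial)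
                    = cs[pvFind cs i pvSpecial]'hjlt
                      :: ((cs.drop (pvFind cs i pvSpecial + 1)).takeWhile
                          (fun d => decide (d ≠ cs[pvFind cs i pvSpecial]'hjlt))
                        ++ [cs[pvFind cs i pvSpecial]'hjlt]) := by
                  rw [hconsj]
                  rw [show pvFind cs (pvFind cs i pvSpecial + 1)
                      (fun d => d == cs[pvFind cs i pvSpecial]'hjlt) + 1 - pvFind cs i pvSpecial
                      = ((cs.drop (pvFind cs i pvSpecial + 1)).findIdx
                        (fun d => d == cs[pvFind cs i pvSpecial]'hjlt) + 1) + 1 from by omega]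
                  rw [List.take_cons (by omega)]
                  congr 1
                  simp only [Nat.add_sub_cancel]
                  rw [List.take_add_one, hpred _, take_findIdx]
                  congr 1
                  have hsome : (cs.drop (pvFind cs i pvSpecial + 1))[(cs.drop (pvFind cs i pvSpecial + 1)).findIdx
                      (fun d => d == cs[pvFind cs i pvSpecial]'hjlt)]? = some (cs[pvFind cs i pvSpecial]'hjlt) := by
                    rw [List.getElem?_eq_getElem hg]
                    have := List.findIdx_getElem (w := hg)
                    simpa [Bool.beq_eq_decide_eq] using this
                  rw [hsome]
                  rfl
                rw [htk]
                simp [List.append_assoc]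
              · -- unterminated quote: jump to end
                have hge : (cs.drop (pvFind cs i pvSpecial + 1)).findIdx
                    (fun d => d == cs[pvFind cs i pvSpecial]'hjlt)
                    = (cs.drop (pvFind cs i pvSpecial + 1)).length := by omega
                have hdw : (cs.drop (pvFind cs i pvSpecial + 1)).dropWhile
                    (fun d => decide (d ≠ cs[pvFind cs i pvSpecial]'hjlt)) = [] := by
                  rw [hpred _, ← drop_findIdx, hge, List.drop_length]
                rw [hdw]
                rw [ih cs (pvFind cs (pvFind cs i pvSpecial + 1)
                  (fun d => d == cs[pvFind cs i pvSpecial]'hjlt) + 1) (by omega)]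
                rw [List.drop_eq_nil_of_le (by omega)]
                have htk : (cs.drop (pvFind cs i pvSpecial)).take
                    (pvFind cs (pvFind cs i pvSpecial + 1)
                      (fun d => d == cs[pvFind cs i pvSpecial]'hjlt) + 1 - pvFind cs i pvSpecial)
                    = cs.drop (pvFind cs i pvSpecial) :=
                  List.take_of_length_le (by
                    rw [List.length_drop]
                    omega)
                rw [htk, pvSplitK, hconsj]
                simp
      · rw [pvScanJ, dif_neg hi, List.drop_eq_nil_of_le (by omega), pvSplitK]

-- pvProc ignores tokens without '='
lemma foldl_pvProc_filter : ∀ (l : List (List Char)) (st : List String × PySem.Dict String String × PySem.Dict String String),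
    l.foldl pvProc st = (l.filter (fun t => t.contains '=')).foldl pvProc st := by
  intro l
  induction l with
  | nil => intro st; rfl
  | cons t rest ih =>
      intro st
      by_cases h : '=' ∈ t
      · rw [List.foldl_cons, List.filter_cons, if_pos (by simpa using h), List.foldl_cons, ih]
      · rw [List.foldl_cons, List.filter_cons, if_neg (by simpa using h), ih]
        congr 1
        simp [pvProc, h]

-- on tokens all containing '=', A's single fold is B's staged folds, with order = keys of key_style
lemma foldl_pvProc_split : ∀ (l : List (List Char)), (∀ t ∈ l, t.contains '=' = true) →
    ∀ (st : List String × PySem.Dict String String × PySem.Dict String String), st.1 = st.2.2.keys →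
    l.foldl pvProc st =
      ((l.foldl (fun d t => d.setdefault (pvPair t).1 (pvPair t).2.1) st.2.2).keys,
       l.foldl (fun d t => d.insert (pvPair t).1 (pvPair t).2.2) st.2.1,
       l.foldl (fun d t => d.setdefault (pvPair t).1 (pvPair t).2.1) st.2.2) := by
  intro l
  induction l with
  | nil =>
      intro _ st hst
      simp only [List.foldl_nil]
      rw [← hst]
  | cons t rest ih =>
      intro h st hst
      have ht : '=' ∈ t := by
        have := h t (by simp)
        simpa using this
      simp only [List.foldl_cons]
      by_cases hk : st.2.2.contains (pvPair t).1
      · have hk2 := hk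
        simp only [pvPair, ne_eq, decide_not] at hk2
        have hproc : pvProc st t = (st.1, st.2.1.insert (pvPair t).1 (pvPair t).2.2, st.2.2) := by
          simp [pvProc, pvPair, ht, hk2]
        have hsd : st.2.2.setdefault (pvPair t).1 (pvPair t).2.1 = st.2.2 :=
          PySem.Dict.setdefault_of_contains _ _ hk
        rw [hproc, hsd,
          ih (fun t' h' => h t' (by simp [h'])) (st.1, st.2.1.insert (pvPair t).1 (pvPair t).2.2, st.2.2) hst]
      · have hk' : st.2.2.contains (pvPair t).1 = false := by simpa using hk
        have hproc : pvProc st t =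
            (st.1 ++ [(pvPair t).1], st.2.1.insert (pvPair t).1 (pvPair t).2.2,
              st.2.2.insert (pvPair t).1 (pvPair t).2.1) := by
          have hk2 := hk'
          simp only [pvPair, ne_eq, decide_not] at hk2
          simp [pvProc, pvPair, ht, hk2]
        have hsd : st.2.2.setdefault (pvPair t).1 (pvPair t).2.1 =
            st.2.2.insert (pvPair t).1 (pvPair t).2.1 :=
          PySem.Dict.setdefault_of_not_contains _ _ hk'
        have hinv : st.1 ++ [(pvPair t).1] = (st.2.2.insert (pvPair t).1 (pvPair t).2.1).keys := by
          rw [PySem.Dict.keys_insert_of_not_contains _ _ hk', hst]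
        rw [hproc, hsd,
          ih (fun t' h' => h t' (by simp [h']))
            (st.1 ++ [(pvPair t).1], st.2.1.insert (pvPair t).1 (pvPair t).2.2,
              st.2.2.insert (pvPair t).1 (pvPair t).2.1) hinv]

-- ===== VERDICT (by name: the statement is the Claim_ definition above) =====
theorem parse_namelist_entries_py_spec : Claim_equal_parse_namelist_entries_py := by
  intro body _
  unfold Spec_parse_namelist_entries_py parse_namelist_entries_py parse_namelist_entries_py_alt
  rw [scanJ_eq_K body.toList.length body.toList 0 (by omega), List.drop_zero]
  rw [splitA_eq_filterK body.toList.length body.toList (le_refl _) [] none]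
  rw [foldl_pvProc_filter]
  rw [List.filter_filter]
  have hff : (pvSplitK body.toList [] none).filter (fun t => t.contains '=' && !t.isEmpty)
      = (pvSplitK body.toList [] none).filter (fun t => t.contains '=') := by
    apply List.filter_congr
    intro t _
    cases t with
    | nil => rfl
    | cons a l => simp
  rw [hff]
  rw [foldl_pvProc_split _ (fun t ht => (List.mem_filter.mp ht).2) _ rfl]
  simp only [List.foldl_map]
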